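-- pv_equiv track=rewrite | github.com/yesnoj/ScommettiamoChe | pronostici_app_Wikipedia_pimp.py | find_next_giornata
-- ===== SOURCE A (Python) =====
-- def find_next_giornata(giornate_data):
--     """Trova la prossima giornata da giocare.
--     Priorità: giornata con più fixtures (almeno 5), altrimenti la prima con fixtures."""
--     candidates = []
--     for g in sorted(giornate_data.keys()):
--         nf = len(giornate_data[g].get('fixtures', []))
--         if nf > 0:
--             candidates.append((g, nf))
--     if not candidates:
--         return max(giornate_data.keys()) + 1 if giornate_data else 1
--     # Trova la prima giornata con >=5 fixtures (giornata "piena")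
--     for g, nf in candidates:
--         if nf >= 5:
--             return g
--     # Se nessuna ha >=5, prendi quella con più fixtures
--     return max(candidates, key=lambda x: x[1])[0]
-- ===== SOURCE B (Python) =====
-- def find_next_giornata(giornate_data):
--     """Trova la prossima giornata da giocare.
--     Priorità: giornata con più fixtures (almeno 5), altrimenti la prima con fixtures."""
--     if not giornate_data:
--         return 1
--     full = None   # smallest giornata with >= 5 fixtures
--     best = None   # (g, nf): highest fixture count, ties -> smallest giornata
--     for g, info in giornate_data.items():
--         nf = len(info.get('fixtures', []))
--         if nf >= 5 and (full is None or g < full):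
--             full = g
--         if nf > 0 and (best is None or nf > best[1] or (nf == best[1] and g < best[0])):
--             best = (g, nf)
--     if full is not None:
--         return full
--     if best is not None:
--         return best[0]
--     return max(giornate_data.keys()) + 1
-- ===== Notes on version B (the rewrite author's own statement) =====
-- stated objective: alternative
-- what changed: Replaces A's sort of the keys plus a candidates list and two further scans (first-full scan, max-by-count) with a single unsorted pass over the dict that maintains the smallest full giornata and the lexicographically best (count desc, giornata asc) candidate.
import Mathlib
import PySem

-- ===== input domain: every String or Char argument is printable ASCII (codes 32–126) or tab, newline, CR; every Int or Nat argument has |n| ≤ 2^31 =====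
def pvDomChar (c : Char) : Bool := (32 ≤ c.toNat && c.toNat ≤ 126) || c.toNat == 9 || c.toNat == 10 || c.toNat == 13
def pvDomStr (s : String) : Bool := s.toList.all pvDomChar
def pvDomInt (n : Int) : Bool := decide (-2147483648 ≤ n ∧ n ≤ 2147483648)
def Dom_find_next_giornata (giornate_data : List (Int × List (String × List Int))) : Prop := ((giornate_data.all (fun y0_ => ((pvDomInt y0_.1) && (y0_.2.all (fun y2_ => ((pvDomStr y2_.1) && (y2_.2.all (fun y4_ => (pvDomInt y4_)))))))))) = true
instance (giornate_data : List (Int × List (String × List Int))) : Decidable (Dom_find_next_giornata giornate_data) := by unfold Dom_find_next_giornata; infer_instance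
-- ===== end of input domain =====

-- B replaces A's key-sort + candidates list + two further scans by one unsorted pass keeping two running extrema (alternative decomposition; same return value).

-- ===== PORT A =====

-- A's second loop: 'for g, nf in candidates: if nf >= 5: return g'
def pvFirstFull : List (Int × Nat) → Option Int
  | [] => none
  | (g, nf) :: rest => if 5 ≤ nf then some g else pvFirstFull rest

def find_next_giornata (giornate_data : List (Int × List (String × List Int))) : Int :=
  let d := PySem.Dict.ofList giornate_data
  let candidates :=
    (PySem.List.sorted d.keys (fun x => x) false).foldl
      (fun acc g =>
        let nf := ((PySem.Dict.ofList (d.getD g [])).getD "fixtures" []).length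
        if 0 < nf then acc ++ [(g, nf)] else acc) []
  if candidates = [] then
    (if d.items = [] then 1 else (PySem.List.max? d.keys (fun x => x)).getD 0 + 1)
  else
    match pvFirstFull candidates with
    | some g => g
    | none => ((PySem.List.max? candidates (fun c => c.2)).getD (0, 0)).1

-- ===== PORT B =====

-- one step of B's single pass: update (full, best) with the item (g, info)
def pvStep (acc : Option Int × Option (Int × Nat)) (item : Int × List (String × List Int)) :
    Option Int × Option (Int × Nat) :=
  let g := item.1
  let nf := ((PySem.Dict.ofList item.2).getD "fixtures" []).length
  let full :=
    if 5 ≤ nf then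
      match acc.1 with
      | none => some g
      | some f => if g < f then some g else some f
    else acc.1
  let best :=
    if 0 < nf then
      match acc.2 with
      | none => some (g, nf)
      | some (bg, bn) =>
        if bn < nf ∨ (bn = nf ∧ g < bg) then some (g, nf) else some (bg, bn)
    else acc.2
  (full, best)

def find_next_giornata_alt (giornate_data : List (Int × List (String × List Int))) : Int :=
  let d := PySem.Dict.ofList giornate_data
  if d.items = [] then 1
  else
    let r := d.items.foldl pvStep (none, none)
    match r.1 with
    | some g => g
    | none =>
      match r.2 with
      | some (bg, _) => bg
      | none => (PySem.List.max? d.keys (fun x => x)).getD 0 + 1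

-- ===== PRECONDITION & SPEC =====
def Spec_find_next_giornata (giornate_data : List (Int × List (String × List Int))) (out : Int) : Prop := out = find_next_giornata_alt giornate_data
instance (giornate_data : List (Int × List (String × List Int))) (out : Int) : Decidable (Spec_find_next_giornata giornate_data out) := by unfold Spec_find_next_giornata; infer_instance

-- ===== CLAIM (what is proved, stated in full; the proofs are below) =====
def Claim_equal_find_next_giornata : Prop := ∀ (giornate_data : List (Int × List (String × List Int))), Dom_find_next_giornata giornate_data → Spec_find_next_giornata giornate_data (find_next_giornata giornate_data)

-- ===== LEMMAS AND PROOFS =====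

-- the fixture count of the giornata g in d
def nfK (d : PySem.Dict Int (List (String × List Int))) (g : Int) : Nat :=
  ((PySem.Dict.ofList (d.getD g [])).getD "fixtures" []).length

-- the 'full' accumulator step of B, per key
def fullC (nf : Int → Nat) (o : Option Int) (g : Int) : Option Int :=
  if 5 ≤ nf g then
    match o with
    | none => some g
    | some f => if g < f then some g else some f
  else o

-- the 'best' accumulator step of B, per key
def bestC (nf : Int → Nat) (o : Option (Int × Nat)) (g : Int) : Option (Int × Nat) :=
  if 0 < nf g then
    match o with
    | none => some (g, nf g)
    | some (bg, bn) => if bn < nf g ∨ (bn = nf g ∧ g < bg) then some (g, nf g) else some (bg, bn)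
  else o

theorem fullC_comm (nf : Int → Nat) (o : Option Int) (a b : Int) :
    fullC nf (fullC nf o a) b = fullC nf (fullC nf o b) a := by
  by_cases h1 : 5 ≤ nf a <;> by_cases h2 : 5 ≤ nf b <;>
    rcases o with _ | f <;>
    simp only [fullC, h1, h2, if_true, if_false, if_pos, if_neg, ite_true, ite_false] <;>
    (split_ifs <;> simp_all) <;> (try (split_ifs <;> simp_all)) <;> omega

theorem bestC_comm (nf : Int → Nat) (o : Option (Int × Nat)) (a b : Int) :
    bestC nf (bestC nf o a) b = bestC nf (bestC nf o b) a := by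
  by_cases h1 : 0 < nf a <;> by_cases h2 : 0 < nf b <;>
    rcases o with _ | ⟨bg, bn⟩ <;>
    simp only [bestC, h1, h2, if_true, if_false, ite_true, ite_false] <;>
    (split_ifs <;> simp_all) <;> (try (split_ifs <;> simp_all)) <;> omega

-- A's candidates list over a key list
def csOf (nf : Int → Nat) (L : List Int) : List (Int × Nat) :=
  (L.filter (fun g => decide (0 < nf g))).map (fun g => (g, nf g))

theorem cand_foldl (nf : Int → Nat) (L : List Int) (acc : List (Int × Nat)) :
    L.foldl (fun acc g => if 0 < nf g then acc ++ [(g, nf g)] else acc) acc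
      = acc ++ csOf nf L := by
  induction L generalizing acc with
  | nil => simp [csOf]
  | cons a t ih =>
    by_cases h : 0 < nf a <;> simp [csOf, h, ih, List.filter_cons] at * <;> simp [ih]

theorem firstFull_find (nf : Int → Nat) (L : List Int) :
    pvFirstFull (csOf nf L) = L.find? (fun g => decide (5 ≤ nf g)) := by
  induction L with
  | nil => rfl
  | cons a t ih =>
    by_cases h : 0 < nf a
    · by_cases h5 : 5 ≤ nf a <;>
        simp [csOf, List.filter_cons, h, pvFirstFull, List.find?, h5] at * <;> exact ih
    · have h5 : ¬ 5 ≤ nf a := by omega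
      simp [csOf, List.filter_cons, h, List.find?, h5] at *
      exact ih

-- folding fullC stays at some f when every later key is bigger
theorem full_fold_stay (nf : Int → Nat) (L : List Int) (f : Int) (h : ∀ g ∈ L, f < g) :
    L.foldl (fullC nf) (some f) = some f := by
  induction L with
  | nil => rfl
  | cons a t ih =>
    have ha : f < a := h a (by simp)
    have hstep : fullC nf (some f) a = some f := by
      simp only [fullC]; split_ifs with h1 h2 <;> simp_all <;> omega
    rw [List.foldl_cons, hstep]
    exact ih (fun g hg => h g (by simp [hg]))

-- on a strictly increasing key list, the fullC fold is the first full giornata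
theorem full_fold_find (nf : Int → Nat) (L : List Int) (h : L.Pairwise (· < ·)) :
    L.foldl (fullC nf) none = L.find? (fun g => decide (5 ≤ nf g)) := by
  induction L with
  | nil => rfl
  | cons a t ih =>
    rcases List.pairwise_cons.mp h with ⟨ha, ht⟩
    by_cases h5 : 5 ≤ nf a
    · rw [List.foldl_cons]
      have hstep : fullC nf none a = some a := by simp [fullC, h5]
      rw [hstep, full_fold_stay nf t a ha]
      simp [List.find?, h5]
    · rw [List.foldl_cons]
      have hstep : fullC nf none a = none := by simp [fullC, h5]
      rw [hstep, ih ht]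
      simp [List.find?, h5]

-- the bestC combine restricted to the candidate list
def bcomb (o : Option (Int × Nat)) (c : Int × Nat) : Option (Int × Nat) :=
  match o with
  | none => some c
  | some (bg, bn) => if bn < c.2 ∨ (bn = c.2 ∧ c.1 < bg) then some c else some (bg, bn)

theorem best_fold_cs (nf : Int → Nat) (L : List Int) (o : Option (Int × Nat)) :
    L.foldl (bestC nf) o = (csOf nf L).foldl bcomb o := by
  induction L generalizing o with
  | nil => rfl
  | cons a t ih =>
    by_cases h : 0 < nf a
    · have hstep : bestC nf o a = bcomb o (a, nf a) := by
        rcases o with _ | ⟨bg, bn⟩ <;> simp [bestC, bcomb, h]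
      have hcs : csOf nf (a :: t) = (a, nf a) :: csOf nf t := by
        simp [csOf, List.filter_cons, h]
      rw [List.foldl_cons, hcs, List.foldl_cons, hstep]
      exact ih _
    · have hstep : bestC nf o a = o := by simp [bestC, h]
      have hcs : csOf nf (a :: t) = csOf nf t := by
        simp [csOf, List.filter_cons, h]
      rw [List.foldl_cons, hstep, hcs]
      exact ih o

-- the foldl that max? with key (·.2) is, by definition
def maxStep (o : Option (Int × Nat)) (c : Int × Nat) : Option (Int × Nat) :=
  match o with
  | none => some c
  | some m => if m.2 < c.2 then some c else some m

theorem max?_eq_foldl (cs : List (Int × Nat)) :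
    PySem.List.max? cs (fun c => c.2) = cs.foldl maxStep none := by
  simp only [PySem.List.max?]
  congr 1
  funext o c
  rcases o with _ | m <;> first | rfl | (simp only [maxStep]; split_ifs <;> rfl)

theorem bcomb_max_some (cs : List (Int × Nat)) (hpw : cs.Pairwise (fun a b => a.1 < b.1))
    (c : Int × Nat) (hc : ∀ y ∈ cs, c.1 < y.1) :
    cs.foldl bcomb (some c) = cs.foldl maxStep (some c) := by
  induction cs generalizing c with
  | nil => rfl
  | cons y t ih =>
    rcases List.pairwise_cons.mp hpw with ⟨hy, ht⟩
    have hcy : c.1 < y.1 := hc y (by simp)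
    have hstep : bcomb (some c) y = maxStep (some c) y := by
      rcases c with ⟨cg, cn⟩
      simp only [bcomb, maxStep]
      split_ifs <;> simp_all <;> omega
    rw [List.foldl_cons, List.foldl_cons, hstep]
    by_cases hlt : c.2 < y.2
    · have hred : maxStep (some c) y = some y := by rcases c with ⟨cg,cn⟩; simp [maxStep, hlt]
      rw [hred]; exact ih ht y hy
    · have hred : maxStep (some c) y = some c := by rcases c with ⟨cg,cn⟩; simp [maxStep, hlt]
      rw [hred]
      exact ih ht c (fun z hz => lt_trans hcy (hy z hz))

-- on candidates with strictly increasing keys, the bcomb fold is Python's max(..., key=count)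
theorem bcomb_max (cs : List (Int × Nat)) (hpw : cs.Pairwise (fun a b => a.1 < b.1)) :
    cs.foldl bcomb none = PySem.List.max? cs (fun c => c.2) := by
  rw [max?_eq_foldl]
  cases cs with
  | nil => rfl
  | cons c t =>
    rcases List.pairwise_cons.mp hpw with ⟨hy, ht⟩
    rw [List.foldl_cons, List.foldl_cons]
    have h1 : bcomb none c = some c := rfl
    have h2 : maxStep none c = some c := rfl
    rw [h1, h2]
    exact bcomb_max_some t ht c hy

theorem step_eq (d : PySem.Dict Int (List (String × List Int)))
    (acc : Option Int × Option (Int × Nat)) (g : Int) :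
    pvStep acc (g, d.getD g []) = (fullC (nfK d) acc.1 g, bestC (nfK d) acc.2 g) := rfl

theorem fold_pair (nf : Int → Nat) (L : List Int) (o1 : Option Int) (o2 : Option (Int × Nat)) :
    L.foldl (fun acc g => (fullC nf acc.1 g, bestC nf acc.2 g)) (o1, o2)
      = (L.foldl (fullC nf) o1, L.foldl (bestC nf) o2) := by
  induction L generalizing o1 o2 with
  | nil => rfl
  | cons a t ih => simp [List.foldl_cons, ih]

theorem fold_stepK_perm (d : PySem.Dict Int (List (String × List Int))) (L1 L2 : List Int)
    (h : L1.Perm L2) (o : Option Int × Option (Int × Nat)) :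
    L1.foldl (fun acc g => (fullC (nfK d) acc.1 g, bestC (nfK d) acc.2 g)) o
      = L2.foldl (fun acc g => (fullC (nfK d) acc.1 g, bestC (nfK d) acc.2 g)) o := by
  letI : RightCommutative (fun (acc : Option Int × Option (Int × Nat)) (g : Int) =>
      (fullC (nfK d) acc.1 g, bestC (nfK d) acc.2 g)) :=
    ⟨fun o a b => by simp only [Prod.mk.injEq]; exact ⟨fullC_comm _ _ _ _, bestC_comm _ _ _ _⟩⟩
  exact h.foldl_eq o

theorem find_next_giornata_main (gd : List (Int × List (String × List Int))) :
    find_next_giornata gd = find_next_giornata_alt gd := by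
  unfold find_next_giornata find_next_giornata_alt
  dsimp only
  set d := PySem.Dict.ofList gd with hd
  set S := PySem.List.sorted d.keys (fun x => x) false with hSdef
  have hnd : d.keys.Nodup := PySem.Dict.nodup_keys_ofList gd
  have hperm : S.Perm d.keys := PySem.List.sorted_perm d.keys (fun x => x) false
  have hSnd : S.Nodup := hperm.nodup_iff.mpr hnd
  have hle : S.Pairwise (fun a b => a ≤ b) := PySem.List.sorted_pairwise d.keys (fun x => x)
  have hpw : S.Pairwise (· < ·) := (hle.and hSnd).imp (fun h => lt_of_le_of_ne h.1 h.2)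
  have hcand :
      S.foldl (fun acc g =>
        let nf := ((PySem.Dict.ofList (d.getD g [])).getD "fixtures" []).length
        if 0 < nf then acc ++ [(g, nf)] else acc) [] = csOf (nfK d) S := by
    simpa using cand_foldl (nfK d) S []
  have hitems : d.items = d.keys.map (fun k => (k, d.getD k [])) :=
    PySem.Dict.items_eq_map_keys d hnd []
  have hfold :
      d.items.foldl pvStep (none, none)
        = (S.foldl (fullC (nfK d)) none, S.foldl (bestC (nfK d)) none) := by
    rw [hitems, List.foldl_map]
    have h1 : (fun (acc : Option Int × Option (Int × Nat)) (g : Int) => pvStep acc (g, d.getD g []))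
        = (fun acc g => (fullC (nfK d) acc.1 g, bestC (nfK d) acc.2 g)) := by
      funext acc g; exact step_eq d acc g
    rw [h1, fold_stepK_perm d d.keys S hperm.symm, fold_pair]
  rw [hcand, hfold]
  by_cases hks : d.keys = []
  · have hS0 : S = [] := by
      rw [hSdef, PySem.List.sorted_eq_nil_iff, hks]
    have hit0 : d.items = [] := by rw [hitems, hks]; rfl
    simp [hS0, hit0, csOf, pvFirstFull]
  · have hit : d.items ≠ [] := by
      intro h0; apply hks
      have hmap := hitems; rw [h0] at hmap
      cases hk : d.keys with
      | nil => rfl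
      | cons a t => rw [hk] at hmap; simp at hmap
    by_cases hcs : csOf (nfK d) S = []
    · have hzero : ∀ g ∈ S, ¬ (0 < nfK d g) := by
        intro g hg hpos
        have hmem : g ∈ S.filter (fun g => decide (0 < nfK d g)) := by
          simp [List.mem_filter, hg, hpos]
        rw [show S.filter (fun g => decide (0 < nfK d g)) = [] from by
          have hcs' := hcs; unfold csOf at hcs'; simpa using hcs'] at hmem
        simp at hmem
      have hfind : S.find? (fun g => decide (5 ≤ nfK d g)) = none := by
        rw [List.find?_eq_none]
        intro g hg
        simp only [decide_eq_true_eq]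
        intro h5; exact hzero g hg (by omega)
      rw [full_fold_find _ _ hpw, hfind, best_fold_cs, hcs]
      simp [hit, pvFirstFull]
    · have hpwcs : (csOf (nfK d) S).Pairwise (fun a b => a.1 < b.1) := by
        unfold csOf
        exact List.pairwise_map.mpr (hpw.filter _)
      rw [full_fold_find _ _ hpw, best_fold_cs, bcomb_max _ hpwcs, firstFull_find]
      simp only [if_neg hcs, if_neg hit]
      cases hfind : S.find? (fun g => decide (5 ≤ nfK d g)) with
      | some g => simp
      | none =>
        have hmax : PySem.List.max? (csOf (nfK d) S) (fun c => c.2) ≠ none := by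
          intro h0
          exact hcs ((PySem.List.max?_eq_none_iff _ _).mp h0)
        obtain ⟨m, hm⟩ := Option.ne_none_iff_exists'.mp hmax
        rw [hm]
        rcases m with ⟨mg, mn⟩
        simp

-- ===== VERDICT (by name: the statement is the Claim_ definition above) =====
theorem find_next_giornata_spec : Claim_equal_find_next_giornata := by
  intro gd _
  unfold Spec_find_next_giornata
  exact find_next_giornata_main gd
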